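-- pv_equiv track=rewrite | github.com/nummy/exec | words/Assignment_2/sudoku.py | seperate_digits
-- ===== SOURCE A (Python) =====
-- def seperate_digits(digits):
--     LT = []
--     RT = []
--     LB = []
--     RB = []
--     digits = list(digits)
--     digits.sort()
--     for digit in digits:
--         if digit < 3:
--             LT.append(str(digit))
--         elif digit < 5:
--             RT.append(str(digit))
--         elif digit < 7:
--             LB.append(str(digit))
--         else:
--             RB.append(str(digit))
--     return " ".join(LT), " ".join(RT), " ".join(LB), " ".join(RB)
-- ===== SOURCE B (Python) =====
-- import bisect
--
--
-- def seperate_digits(digits):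
--     s = sorted(digits)
--     i1 = bisect.bisect_left(s, 3)
--     i2 = bisect.bisect_left(s, 5)
--     i3 = bisect.bisect_left(s, 7)
--     return (" ".join(map(str, s[:i1])),
--             " ".join(map(str, s[i1:i2])),
--             " ".join(map(str, s[i2:i3])),
--             " ".join(map(str, s[i3:])))
-- ===== Notes on version B (the rewrite author's own statement) =====
-- stated objective: alternative
-- what changed: Instead of scanning every sorted element through an if/elif chain into four accumulators, B binary-searches (bisect_left) the three cut points 3, 5, 7 in the sorted list and slices it into the four contiguous groups.
import Mathlib
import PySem

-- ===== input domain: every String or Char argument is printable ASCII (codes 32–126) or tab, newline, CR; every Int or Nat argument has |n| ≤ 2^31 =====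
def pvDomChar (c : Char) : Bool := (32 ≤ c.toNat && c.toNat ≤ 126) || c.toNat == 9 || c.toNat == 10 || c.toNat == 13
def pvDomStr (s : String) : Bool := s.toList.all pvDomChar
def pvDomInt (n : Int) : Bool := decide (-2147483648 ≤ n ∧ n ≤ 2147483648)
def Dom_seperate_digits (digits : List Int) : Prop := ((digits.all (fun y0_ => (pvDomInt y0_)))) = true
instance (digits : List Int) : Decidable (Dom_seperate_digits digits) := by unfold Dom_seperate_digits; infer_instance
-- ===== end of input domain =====

-- B replaces A's per-element if/elif bucket scan by three binary searches (bisect_left at 3, 5, 7)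
-- on the sorted list followed by four slices; same results, a different algorithm (objective: alternative).


-- ===== PORT A =====
-- one loop iteration: append str(digit) to the bucket chosen by the if/elif chain
def sepStep (st : List String × List String × List String × List String) (digit : Int) :
    List String × List String × List String × List String :=
  if digit < 3 then (st.1 ++ [PySem.Int.toStr digit], st.2.1, st.2.2.1, st.2.2.2)
  else if digit < 5 then (st.1, st.2.1 ++ [PySem.Int.toStr digit], st.2.2.1, st.2.2.2)
  else if digit < 7 then (st.1, st.2.1, st.2.2.1 ++ [PySem.Int.toStr digit], st.2.2.2)
  else (st.1, st.2.1, st.2.2.1, st.2.2.2 ++ [PySem.Int.toStr digit])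

def seperate_digits (digits : List Int) : String × String × String × String :=
  let ds := PySem.List.sorted digits (fun x => x)
  let st := ds.foldl sepStep ([], [], [], [])
  (PySem.Str.join " " st.1, PySem.Str.join " " st.2.1,
   PySem.Str.join " " st.2.2.1, PySem.Str.join " " st.2.2.2)

-- ===== PORT B =====
def seperate_digits_alt (digits : List Int) : String × String × String × String :=
  let s := PySem.List.sorted digits (fun x => x)
  let i1 := PySem.List.bisectLeft s 3
  let i2 := PySem.List.bisectLeft s 5
  let i3 := PySem.List.bisectLeft s 7
  (PySem.Str.join " " ((PySem.List.slice s none (some (i1 : Int))).map PySem.Int.toStr),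
   PySem.Str.join " " ((PySem.List.slice s (some (i1 : Int)) (some (i2 : Int))).map PySem.Int.toStr),
   PySem.Str.join " " ((PySem.List.slice s (some (i2 : Int)) (some (i3 : Int))).map PySem.Int.toStr),
   PySem.Str.join " " ((PySem.List.slice s (some (i3 : Int)) none).map PySem.Int.toStr))

-- ===== PRECONDITION & SPEC =====
def Spec_seperate_digits (digits : List Int) (out : String × String × String × String) : Prop := out = seperate_digits_alt digits
instance (digits : List Int) (out : String × String × String × String) : Decidable (Spec_seperate_digits digits out) := by unfold Spec_seperate_digits; infer_instance

-- ===== CLAIM (what is proved, stated in full; the proofs are below) =====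
def Claim_equal_seperate_digits : Prop := ∀ (digits : List Int), Dom_seperate_digits digits → Spec_seperate_digits digits (seperate_digits digits)

-- ===== LEMMAS AND PROOFS =====

-- Any index i whose left part is all < x and right part is all ≥ x splits s into filter (< x) and filter (x ≤).
lemma take_drop_eq_filter (s : List Int) (x : Int) (i : Nat) (hle : i ≤ s.length)
    (hlt : ∀ (j : Nat) (hj : j < s.length), j < i → s[j] < x)
    (hge : ∀ (j : Nat) (hj : j < s.length), i ≤ j → x ≤ s[j]) :
    s.take i = s.filter (fun d => decide (d < x)) ∧
    s.drop i = s.filter (fun d => decide (x ≤ d)) := by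
  have htake : ∀ a ∈ s.take i, a < x := by
    intro a ha
    obtain ⟨j, hj, rfl⟩ := List.mem_iff_getElem.mp ha
    have hj' : j < i := lt_of_lt_of_le hj (by simp [List.length_take])
    rw [List.getElem_take]
    exact hlt j (by omega) hj'
  have hdrop : ∀ a ∈ s.drop i, x ≤ a := by
    intro a ha
    obtain ⟨j, hj, rfl⟩ := List.mem_iff_getElem.mp ha
    rw [List.getElem_drop]
    have hj' : i + j < s.length := by simp [List.length_drop] at hj; omega
    exact hge (i + j) hj' (by omega)
  constructor
  · conv_rhs => rw [← List.take_append_drop i s]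
    rw [List.filter_append,
      List.filter_eq_self.mpr (fun a ha => by simpa using htake a ha),
      List.filter_eq_nil_iff.mpr (fun a ha => by simpa using not_lt.mpr (hdrop a ha)),
      List.append_nil]
  · conv_rhs => rw [← List.take_append_drop i s]
    rw [List.filter_append,
      List.filter_eq_nil_iff.mpr (fun a ha => by simpa using not_le.mpr (htake a ha)),
      List.filter_eq_self.mpr (fun a ha => by simpa using hdrop a ha),
      List.nil_append]

-- A's loop appends each element, in order, to the bucket of its if/elif branch.
lemma foldl_sepStep (s : List Int) (a b c d : List String) :
    s.foldl sepStep (a, b, c, d) =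
      (a ++ (s.filter (fun x => decide (x < 3))).map PySem.Int.toStr,
       b ++ (s.filter (fun x => !decide (x < 3) && decide (x < 5))).map PySem.Int.toStr,
       c ++ (s.filter (fun x => !decide (x < 3) && !decide (x < 5) && decide (x < 7))).map PySem.Int.toStr,
       d ++ (s.filter (fun x => !decide (x < 3) && !decide (x < 5) && !decide (x < 7))).map PySem.Int.toStr) := by
  induction s generalizing a b c d with
  | nil => simp
  | cons y t ih =>
    by_cases h3 : y < 3 <;> by_cases h5 : y < 5 <;> by_cases h7 : y < 7 <;>
      simp [sepStep, h3, h5, h7, ih]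


-- ===== VERDICT (by name: the statement is the Claim_ definition above) =====
theorem seperate_digits_spec : Claim_equal_seperate_digits := by
  intro digits _
  unfold Spec_seperate_digits seperate_digits seperate_digits_alt
  set s := PySem.List.sorted digits (fun x => x) with hs
  have hp : s.Pairwise (fun a b => a ≤ b) := PySem.List.sorted_pairwise digits (fun x => x)
  set n := s.length with hn
  obtain ⟨h1n, h1lt, h1ge⟩ := PySem.List.bisectLeft_spec s 3 hp
  obtain ⟨h2n, h2lt, h2ge⟩ := PySem.List.bisectLeft_spec s 5 hp
  obtain ⟨h3n, h3lt, h3ge⟩ := PySem.List.bisectLeft_spec s 7 hp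
  set i1 := PySem.List.bisectLeft s 3 with hi1
  set i2 := PySem.List.bisectLeft s 5 with hi2
  set i3 := PySem.List.bisectLeft s 7 with hi3
  have h12 : i1 ≤ i2 := by
    by_contra h
    have hlt : i2 < n := lt_of_lt_of_le (not_le.mp h) h1n
    have := h1lt i2 hlt (not_le.mp h)
    have := h2ge i2 hlt (le_refl _)
    omega
  have h23 : i2 ≤ i3 := by
    by_contra h
    have hlt : i3 < n := lt_of_lt_of_le (not_le.mp h) h2n
    have := h2lt i3 hlt (not_le.mp h)
    have := h3ge i3 hlt (le_refl _)
    omega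
  -- the four groups as filters
  have e1 : s.take i1 = s.filter (fun d => decide (d < 3)) :=
    (take_drop_eq_filter s 3 i1 h1n h1lt h1ge).1
  have e4 : s.drop i3 = s.filter (fun d => decide (7 ≤ d)) :=
    (take_drop_eq_filter s 7 i3 h3n h3lt h3ge).2
  -- middle slices: apply the split lemma to the tail s.drop i1 (resp. s.drop i2)
  have e2 : (s.drop i1).take (i2 - i1) = (s.drop i1).filter (fun d => decide (d < 5)) :=
    (take_drop_eq_filter (s.drop i1) 5 (i2 - i1) (by simp [List.length_drop]; omega)
      (fun j hj hji => by
        rw [List.getElem_drop]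
        exact h2lt (i1 + j) (by simp [List.length_drop] at hj; omega) (by omega))
      (fun j hj hji => by
        rw [List.getElem_drop]
        exact h2ge (i1 + j) (by simp [List.length_drop] at hj; omega) (by omega))).1
  have e2' : s.drop i1 = s.filter (fun d => decide (3 ≤ d)) :=
    (take_drop_eq_filter s 3 i1 h1n h1lt h1ge).2
  have e3 : (s.drop i2).take (i3 - i2) = (s.drop i2).filter (fun d => decide (d < 7)) :=
    (take_drop_eq_filter (s.drop i2) 7 (i3 - i2) (by simp [List.length_drop]; omega)
      (fun j hj hji => by
        rw [List.getElem_drop]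
        exact h3lt (i2 + j) (by simp [List.length_drop] at hj; omega) (by omega))
      (fun j hj hji => by
        rw [List.getElem_drop]
        exact h3ge (i2 + j) (by simp [List.length_drop] at hj; omega) (by omega))).1
  have e3' : s.drop i2 = s.filter (fun d => decide (5 ≤ d)) :=
    (take_drop_eq_filter s 5 i2 h2n h2lt h2ge).2
  -- slices of B in filter form
  have b1 : PySem.List.slice s none (some (i1 : Int)) = s.filter (fun x => decide (x < 3)) := by
    rw [PySem.List.slice_to_natCast, e1]
  have b2 : PySem.List.slice s (some (i1 : Int)) (some (i2 : Int)) =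
      s.filter (fun x => !decide (x < 3) && decide (x < 5)) := by
    rw [PySem.List.slice_natCast, e2, e2', List.filter_filter]
    exact List.filter_congr (fun a _ => by
      by_cases h3 : a < 3 <;> by_cases h5 : a < 5 <;> simp [h3, h5] <;> omega)
  have b3 : PySem.List.slice s (some (i2 : Int)) (some (i3 : Int)) =
      s.filter (fun x => !decide (x < 3) && !decide (x < 5) && decide (x < 7)) := by
    rw [PySem.List.slice_natCast, e3, e3', List.filter_filter]
    exact List.filter_congr (fun a _ => by
      by_cases h3 : a < 3 <;> by_cases h5 : a < 5 <;> by_cases h7 : a < 7 <;>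
        simp [h3, h5, h7] <;> omega)
  have b4 : PySem.List.slice s (some (i3 : Int)) none =
      s.filter (fun x => !decide (x < 3) && !decide (x < 5) && !decide (x < 7)) := by
    rw [PySem.List.slice_from_natCast, e4]
    exact List.filter_congr (fun a _ => by
      by_cases h3 : a < 3 <;> by_cases h5 : a < 5 <;> by_cases h7 : a < 7 <;>
        simp [h3, h5, h7] <;> omega)
  simp only [← hi1, ← hi2, ← hi3, foldl_sepStep, List.nil_append, b1, b2, b3, b4]
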